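-- pv_equiv track=rewrite | github.com/jodyxha/QHG4 | tools_qdf/comp_attrs.py | group_cols
-- ===== SOURCE A (Python) =====
-- def group_cols(row_args):
--     cols = [0, 0]
--     for i in range(2,len(row_args)):
--         ref = -1
--         for j in range(0,i):
--             if (row_args[i] == row_args[j]):
--                 ref = j
--                 break
--             #-- end if
--         #- end for
--         ref = ref if ref >= 0 else i
--         cols.append(ref-1)
--     #-- end for
--     return cols
-- ===== SOURCE B (Python) =====
-- def group_cols(row_args):
--     n = len(row_args)
--     # Sort positions by (value, position): equal values form contiguous runs whose
--     # head is that value's first occurrence; scatter head-1 to every run member.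
--     order = sorted(range(n), key=lambda i: (row_args[i], i))
--     first = [0] * n
--     run_first = -1
--     for k in order:
--         if run_first < 0 or row_args[k] != row_args[run_first]:
--             run_first = k
--         first[k] = run_first
--     return [0, 0] + [f - 1 for f in first[2:]]
-- ===== Notes on version B (the rewrite author's own statement) =====
-- stated objective: faster
-- what changed: Replaced A's per-position backward rescan with a sort of the positions by (value, position) followed by a single run-scan that scatters each run head (the value's first occurrence) to all its positions; the ref>=0 branch disappears because a run head is its own first occurrence.
import Mathlib
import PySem

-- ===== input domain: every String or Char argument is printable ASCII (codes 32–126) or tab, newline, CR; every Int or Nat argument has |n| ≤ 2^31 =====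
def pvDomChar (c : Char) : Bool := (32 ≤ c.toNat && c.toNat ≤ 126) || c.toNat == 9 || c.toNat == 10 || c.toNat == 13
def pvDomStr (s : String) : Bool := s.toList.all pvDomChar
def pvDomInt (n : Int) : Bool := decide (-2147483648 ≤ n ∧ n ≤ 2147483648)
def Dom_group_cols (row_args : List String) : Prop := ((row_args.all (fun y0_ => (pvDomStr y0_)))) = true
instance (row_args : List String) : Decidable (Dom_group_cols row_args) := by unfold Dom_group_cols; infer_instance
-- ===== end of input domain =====

-- B sorts the positions by (value, position) and scatters each run head (the value's first occurrence) over its run, replacing A's per-position backward rescan (measured faster).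


-- ===== PORT A =====
-- inner 'for j in range(0,i): if row_args[i]==row_args[j]: ref=j; break' (ref stays -1 if no break)
def group_cols_scan (v : String) (xs : List String) : List Int → Int
  | [] => -1
  | j :: rest => if PySem.List.pyGetD xs j "" = v then j else group_cols_scan v xs rest

def group_cols (row_args : List String) : List Int :=
  (PySem.List.pyRange 2 (row_args.length : Int) 1).foldl
    (fun cols i =>
      let ref := group_cols_scan (PySem.List.pyGetD row_args i "") row_args (PySem.List.pyRange 0 i 1)
      let ref := if ref ≥ 0 then ref else i
      cols ++ [ref - 1])
    [0, 0]

-- ===== PORT B =====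
-- 'sorted(range(n), key=lambda i: (row_args[i], i))'
def group_cols_order (row_args : List String) : List Int :=
  PySem.List.sorted2 (PySem.List.pyRange 0 (row_args.length : Int) 1)
    (fun i => PySem.List.pyGetD row_args i "") (fun i => i)

-- 'for k in order: if run_first < 0 or row_args[k] != row_args[run_first]: run_first = k; first[k] = run_first'
def group_cols_alt (row_args : List String) : List Int :=
  let n := row_args.length
  let res := (group_cols_order row_args).foldl
    (fun s k =>
      let r := if s.2 < 0 || !(PySem.List.pyGetD row_args k "" == PySem.List.pyGetD row_args s.2 "") then k else s.2
      (PySem.List.pySetD s.1 k r, r))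
    (PySem.List.pyRepeat [(0 : Int)] (n : Int), -1)
  [0, 0] ++ (PySem.List.slice res.1 (some 2) none).map (fun f => f - 1)

-- ===== PRECONDITION & SPEC =====
def Spec_group_cols (row_args : List String) (out : List Int) : Prop := out = group_cols_alt row_args
instance (row_args : List String) (out : List Int) : Decidable (Spec_group_cols row_args out) := by unfold Spec_group_cols; infer_instance

-- ===== CLAIM (what is proved, stated in full; the proofs are below) =====
def Claim_equal_group_cols : Prop := ∀ (row_args : List String), Dom_group_cols row_args → Spec_group_cols row_args (group_cols row_args)

-- ===== LEMMAS AND PROOFS =====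

def gKey (xs : List String) (i : Int) : String := PySem.List.pyGetD xs i ""
def gF (xs : List String) (i : Int) : Int := (List.findIdx (· == gKey xs i) xs : Int)
def gLt (xs : List String) (a b : Int) : Prop :=
  gKey xs a < gKey xs b ∨ (gKey xs a = gKey xs b ∧ a < b)
def gBefore (xs : List String) (a b : Int) : Bool :=
  decide (gKey xs a < gKey xs b) || (!decide (gKey xs b < gKey xs a) && decide (a < b))
def gStep (xs : List String) (s : List Int × Int) (k : Int) : List Int × Int :=
  let r := if s.2 < 0 || !(PySem.List.pyGetD xs k "" == PySem.List.pyGetD xs s.2 "") then k else s.2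
  (PySem.List.pySetD s.1 k r, r)

lemma gBefore_iff (xs : List String) (a b : Int) : gBefore xs a b = true ↔ gLt xs a b := by
  simp only [gBefore, gLt, Bool.or_eq_true, Bool.and_eq_true, Bool.not_eq_true',
    decide_eq_true_iff, decide_eq_false_iff_not]
  by_cases h1 : gKey xs a < gKey xs b
  · simp [h1]
  · by_cases h2 : gKey xs b < gKey xs a
    · simp [h1, h2, h2.ne']
    · have he : gKey xs a = gKey xs b := le_antisymm (not_lt.mp h2) (not_lt.mp h1)
      simp [h1, h2, he]

lemma gLt_trans (xs : List String) {a b c : Int} (h1 : gLt xs a b) (h2 : gLt xs b c) : gLt xs a c := by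
  rcases h1 with h1 | ⟨h1e, h1l⟩ <;> rcases h2 with h2 | ⟨h2e, h2l⟩
  · exact Or.inl (h1.trans h2)
  · exact Or.inl (h2e ▸ h1)
  · exact Or.inl (h1e ▸ h2)
  · exact Or.inr ⟨h1e.trans h2e, h1l.trans h2l⟩

lemma gLt_irrefl (xs : List String) (a : Int) : ¬ gLt xs a a := by
  intro h; rcases h with h | ⟨_, h⟩ <;> exact absurd h (lt_irrefl _)

lemma gLt_total (xs : List String) {a b : Int} (h : a ≠ b) : gLt xs a b ∨ gLt xs b a := by
  rcases lt_trichotomy (gKey xs a) (gKey xs b) with hk | hk | hk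
  · exact Or.inl (Or.inl hk)
  · rcases lt_or_gt_of_ne h with hl | hl
    · exact Or.inl (Or.inr ⟨hk, hl⟩)
    · exact Or.inr (Or.inr ⟨hk.symm, hl⟩)
  · exact Or.inr (Or.inl hk)

lemma gLt_asymm (xs : List String) {a b : Int} (h : gLt xs a b) : ¬ gLt xs b a := by
  intro h2; exact gLt_irrefl xs a (gLt_trans xs h h2)

lemma insertBy_pairwise (xs : List String) (x : Int) :
    ∀ (acc : List Int), acc.Pairwise (gLt xs) → x ∉ acc →
      (PySem.List.insertBy (gBefore xs) x acc).Pairwise (gLt xs)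
  | [], _, _ => by simp [PySem.List.insertBy]
  | y :: ys, hp, hx => by
    rw [List.pairwise_cons] at hp
    obtain ⟨hy, hys⟩ := hp
    simp only [PySem.List.insertBy]
    by_cases hb : gBefore xs x y = true
    · rw [if_pos hb]
      have hxy : gLt xs x y := (gBefore_iff xs x y).mp hb
      refine List.Pairwise.cons ?_ (List.Pairwise.cons hy hys)
      intro z hz
      rcases List.mem_cons.mp hz with rfl | hz
      · exact hxy
      · exact gLt_trans xs hxy (hy z hz)
    · rw [if_neg hb]
      have hxney : x ≠ y := fun h => hx (h ▸ List.mem_cons_self)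
      have hyx : gLt xs y x := by
        rcases gLt_total xs hxney with h | h
        · exact absurd ((gBefore_iff xs x y).mpr h) hb
        · exact h
      refine List.Pairwise.cons ?_ (insertBy_pairwise xs x ys hys (fun h => hx (List.mem_cons_of_mem _ h)))
      intro z hz
      rcases (PySem.List.mem_insertBy _ _ _ _).mp hz with rfl | hz
      · exact hyx
      · exact hy z hz

lemma foldl_insertBy_pairwise (xs : List String) :
    ∀ (l acc : List Int), l.Nodup → acc.Pairwise (gLt xs) → (∀ y ∈ acc, y ∉ l) →
      (l.foldl (fun a x => PySem.List.insertBy (gBefore xs) x a) acc).Pairwise (gLt xs)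
  | [], acc, _, hp, _ => hp
  | x :: l, acc, hnd, hp, hd => by
    rw [List.nodup_cons] at hnd
    simp only [List.foldl_cons]
    refine foldl_insertBy_pairwise xs l _ hnd.2 ?_ ?_
    · exact insertBy_pairwise xs x acc hp (fun h => (hd x h) List.mem_cons_self)
    · intro y hy
      rcases (PySem.List.mem_insertBy _ _ _ _).mp hy with rfl | hy
      · exact hnd.1
      · exact fun h => hd y hy (List.mem_cons_of_mem _ h)

lemma order_eq_foldl (xs : List String) :
    group_cols_order xs =
      (PySem.List.pyRange 0 (xs.length : Int) 1).foldl
        (fun a x => PySem.List.insertBy (gBefore xs) x a) [] := rfl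

lemma order_pairwise (xs : List String) : (group_cols_order xs).Pairwise (gLt xs) := by
  rw [order_eq_foldl]
  refine foldl_insertBy_pairwise xs _ [] ?_ List.Pairwise.nil (by simp)
  rw [PySem.List.pyRange_zero_natCast]
  exact (List.nodup_range).map (fun a b h => by exact_mod_cast h)

lemma mem_order (xs : List String) (k : Int) :
    k ∈ group_cols_order xs ↔ 0 ≤ k ∧ k < (xs.length : Int) := by
  unfold group_cols_order
  rw [(PySem.List.sorted2_perm _ _ _ _).mem_iff (a := k), PySem.List.mem_pyRange_one]

-- basic facts about gKey / gF
lemma gKey_eq (xs : List String) {k : Int} (h0 : 0 ≤ k) (hn : k < (xs.length : Int)) :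
    gKey xs k = xs[k.toNat]'(by omega) := by
  have hh : k = ((k.toNat : Nat) : Int) := by omega
  rw [gKey]
  conv_lhs => rw [hh]
  rw [PySem.List.pyGetD_natCast, List.getD_eq_getElem?_getD]
  simp [List.getElem?_eq_getElem (show k.toNat < xs.length by omega)]

lemma gF_nonneg (xs : List String) (k : Int) : 0 ≤ gF xs k := by
  simp [gF]

lemma gF_lt_length (xs : List String) {k : Int} (h0 : 0 ≤ k) (hn : k < (xs.length : Int)) :
    gF xs k < (xs.length : Int) := by
  have hmem : gKey xs k ∈ xs := by
    rw [gKey_eq xs h0 hn]; exact List.getElem_mem _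
  have h : List.findIdx (· == gKey xs k) xs < xs.length :=
    List.findIdx_lt_length.mpr ⟨gKey xs k, hmem, by simp⟩
  simp only [gF]
  exact_mod_cast h

lemma gKey_gF (xs : List String) {k : Int} (h0 : 0 ≤ k) (hn : k < (xs.length : Int)) :
    gKey xs (gF xs k) = gKey xs k := by
  have hlt := gF_lt_length xs h0 hn
  rw [gKey_eq xs (gF_nonneg xs k) hlt]
  have hidx : (gF xs k).toNat = List.findIdx (· == gKey xs k) xs := by simp [gF]
  have hl : List.findIdx (· == gKey xs k) xs < xs.length := by
    have h := gF_lt_length xs h0 hn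
    simp only [gF] at h; exact_mod_cast h
  have := @List.findIdx_getElem _ (· == gKey xs k) xs hl
  simp only [beq_iff_eq] at this
  simp_rw [hidx]
  exact this

lemma gF_congr (xs : List String) {a b : Int} (h : gKey xs a = gKey xs b) : gF xs a = gF xs b := by
  simp [gF, h]

lemma gF_eq_self (xs : List String) {k : Int} (h0 : 0 ≤ k) (hn : k < (xs.length : Int))
    (h : ∀ j : Nat, j < k.toNat → gKey xs (j : Int) ≠ gKey xs k) : gF xs k = k := by
  have hkn : k.toNat < xs.length := by omega
  have : List.findIdx (· == gKey xs k) xs = k.toNat := by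
    rw [List.findIdx_eq hkn]
    constructor
    · simp [gKey_eq xs h0 hn]
    · intro j hj
      have := h j hj
      rw [gKey_eq xs (by positivity) (by omega)] at this
      simp only [beq_eq_false_iff_ne, ne_eq]
      intro hc
      apply this
      rw [gKey_eq xs h0 hn] at hc ⊢
      simpa using hc
  rw [gF, this]; omega

-- the main loop invariant for B's scatter pass
lemma loop_main (xs : List String) :
    ∀ (l first : List Int) (r : Int),
      first.length = xs.length →
      l.Pairwise (gLt xs) →
      (∀ k ∈ l, 0 ≤ k ∧ k < (xs.length : Int)) →
      (∀ i : Nat, i < xs.length → ((i : Int) ∉ l) → first[i]? = some (gF xs (i : Int))) →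
      ((r = -1 ∧ ∀ i : Nat, i < xs.length → (i : Int) ∈ l) ∨
       (∃ prev : Int, 0 ≤ prev ∧ prev < (xs.length : Int) ∧ prev ∉ l ∧ r = gF xs prev ∧
          (∀ k ∈ l, gLt xs prev k) ∧
          (∀ j : Int, 0 ≤ j → j < (xs.length : Int) → j ∉ l → j = prev ∨ gLt xs j prev))) →
      (l.foldl (gStep xs) (first, r)).1.length = xs.length ∧
        ∀ i : Nat, i < xs.length → (l.foldl (gStep xs) (first, r)).1[i]? = some (gF xs (i : Int))
  | [], first, r, hlen, _, _, hset, _ => by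
    refine ⟨hlen, ?_⟩
    intro i hi
    exact hset i hi (by simp)
  | k :: l, first, r, hlen, hpw, hbnd, hset, hr => by
    obtain ⟨hk0, hkn⟩ := hbnd k List.mem_cons_self
    rw [List.pairwise_cons] at hpw
    obtain ⟨hkl, hpl⟩ := hpw
    have hknotl : k ∉ l := fun h => gLt_irrefl xs k (hkl k h)
    -- the new run head equals gF xs k
    have hr' : (if r < 0 || !(PySem.List.pyGetD xs k "" == PySem.List.pyGetD xs r "") then k else r) = gF xs k := by
      rcases hr with ⟨hrneg, hall⟩ | ⟨prev, hp0, hpn, hpnl, hpr, hplt, hpmax⟩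
      · -- r = -1: k starts the very first run, so k is its value's first occurrence
        rw [hrneg]
        rw [if_pos (by norm_num)]
        refine (gF_eq_self xs hk0 hkn ?_).symm
        intro j hj hc
        have hjmem : (j : Int) ∈ k :: l := hall j (by omega)
        rcases List.mem_cons.mp hjmem with hjk | hjl
        · omega
        · have h1 : gLt xs k (j : Int) := hkl _ hjl
          have h2 : gLt xs (j : Int) k := Or.inr ⟨hc, by omega⟩
          exact gLt_asymm xs h1 h2
      · -- r = gF prev ≥ 0
        have hrge : ¬ r < 0 := by
          rw [hpr]; have := gF_nonneg xs prev; omega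
        have hkeyr : gKey xs r = gKey xs prev := by
          rw [hpr]; exact gKey_gF xs hp0 hpn
        by_cases hkey : gKey xs k = gKey xs prev
        · -- same run: keep r, and gF k = gF prev = r
          rw [if_neg (by simp [hrge, gKey] at hkeyr ⊢; rw [hkeyr]; simp [gKey] at hkey; rw [hkey])]
          rw [hpr]
          exact (gF_congr xs hkey).symm
        · -- new run: k is its value's first occurrence
          rw [if_pos (by simp [hrge, gKey] at hkeyr ⊢; rw [hkeyr]; simp [gKey] at hkey; exact fun h => hkey h)]
          refine (gF_eq_self xs hk0 hkn ?_).symm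
          intro j hj hc
          have hj0 : (0:Int) ≤ (j:Int) := by positivity
          have hjn : (j:Int) < (xs.length : Int) := by omega
          by_cases hjmem : (j : Int) ∈ k :: l
          · rcases List.mem_cons.mp hjmem with hjk | hjl
            · omega
            · exact gLt_asymm xs (hkl _ hjl) (Or.inr ⟨hc, by omega⟩)
          · rcases hpmax (j : Int) hj0 hjn hjmem with hje | hjlt
            · exact hkey (by rw [← hje]; exact hc.symm)
            · -- key j ≤ key prev ≤ key k and key j = key k forces key prev = key k
              have hpk : gLt xs prev k := hplt k List.mem_cons_self
              have h1 : gKey xs (j:Int) ≤ gKey xs prev := by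
                rcases hjlt with h | ⟨h, _⟩; exact le_of_lt h; exact le_of_eq h
              have h2 : gKey xs prev ≤ gKey xs k := by
                rcases hpk with h | ⟨h, _⟩; exact le_of_lt h; exact le_of_eq h
              rw [hc] at h1
              exact hkey (le_antisymm h1 h2)
    -- apply the induction hypothesis
    simp only [List.foldl_cons, gStep]
    rw [hr']
    refine loop_main xs l (PySem.List.pySetD first k (gF xs k)) (gF xs k) ?_ hpl ?_ ?_ ?_
    · rw [PySem.List.length_pySetD]; exact hlen
    · exact fun k' h => hbnd k' (List.mem_cons_of_mem _ h)
    · intro i hi hil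
      rw [PySem.List.pySetD_of_nonneg _ _ hk0]
      by_cases hik : (i : Int) = k
      · have : i = k.toNat := by omega
        subst this
        rw [List.getElem?_set_self (by omega)]
        rw [hik]
      · rw [List.getElem?_set_ne (by omega)]
        exact hset i hi (by
          intro h
          rcases List.mem_cons.mp h with h | h
          · exact hik h
          · exact hil h)
    · refine Or.inr ⟨k, hk0, hkn, hknotl, rfl, hkl, ?_⟩
      intro j hj0 hjn hjl
      by_cases hjk : j = k
      · exact Or.inl hjk
      · have hjnl : j ∉ k :: l := by
          intro h
          rcases List.mem_cons.mp h with h | h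
          · exact hjk h
          · exact hjl h
        rcases hr with ⟨_, hall⟩ | ⟨prev, _, _, _, _, hplt, hpmax⟩
        · exact absurd (by have := hall j.toNat (by omega); rwa [show ((j.toNat : Nat) : Int) = j by omega] at this) hjnl
        · rcases hpmax j hj0 hjn hjnl with rfl | hjp
          · exact Or.inr (hplt k List.mem_cons_self)
          · exact Or.inr (gLt_trans xs hjp (hplt k List.mem_cons_self))

-- A's inner scan returns the first j<i with equal value, as a findIdx (reused shape)
lemma scan_spec (xs : List String) (v : String) (k : Nat)
    (hk : k < xs.length) (hkv : xs[k] = v) (hmin : ∀ j, j < k → xs.getD j "" ≠ v) :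
    ∀ (n a : Nat), a ≤ k →
      group_cols_scan v xs (PySem.List.pyRange (a : Int) ((a + n : Nat) : Int) 1) =
        (if k < a + n then (k : Int) else -1) := by
  intro n
  induction n with
  | zero =>
    intro a ha
    rw [PySem.List.pyRange_one_eq_nil (by omega)]
    simp [group_cols_scan]
    omega
  | succ n ih =>
    intro a ha
    rw [PySem.List.pyRange_one_cons (by push_cast; omega)]
    simp only [group_cols_scan]
    by_cases hav : a = k
    · subst hav
      rw [if_pos]
      · rw [if_pos (by omega)]
      · rw [PySem.List.pyGetD_natCast]
        simpa [List.getD_eq_getElem?_getD, hk] using hkv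
    · rw [if_neg]
      · have := ih (a + 1) (by omega)
        rw [show ((a : Int) + 1) = ((a + 1 : Nat) : Int) by push_cast; ring,
            show ((a + (n+1) : Nat) : Int) = (((a+1) + n : Nat) : Int) by push_cast; ring] at *
        rw [this, show (a+1) + n = a + (n+1) from by omega]
      · rw [PySem.List.pyGetD_natCast]
        have := hmin a (by omega)
        simpa [List.getD_eq_getElem?_getD, (show a < xs.length by omega)] using this

-- A computes first-occurrence-index minus one for every position from 2 on
lemma A_char (xs : List String) :
    group_cols xs = [0, 0] ++ (xs.drop 2).map (fun v => ((List.findIdx (· == v) xs : Nat) : Int) - 1) := by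
  unfold group_cols
  rw [PySem.List.foldl_append_singleton_eq_map]
  congr 1
  have hmap : ∀ i ∈ PySem.List.pyRange 2 (xs.length : Int) 1,
      (fun i =>
        (let ref := group_cols_scan (PySem.List.pyGetD xs i "") xs (PySem.List.pyRange 0 i 1)
         let ref := if ref ≥ 0 then ref else i
         ref - 1)) i =
      (fun v => ((List.findIdx (· == v) xs : Nat) : Int) - 1) (PySem.List.pyGetD xs i "") := by
    intro i hi
    rw [PySem.List.mem_pyRange_one] at hi
    obtain ⟨h2, hlt⟩ := hi
    set m : Nat := i.toNat with hm
    have him : i = (m : Nat) := by omega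
    have hmlen : m < xs.length := by omega
    have hv : PySem.List.pyGetD xs ((m : Nat) : Int) "" = xs[m] := by
      rw [PySem.List.pyGetD_natCast]
      simp [List.getD_eq_getElem?_getD, hmlen]
    set v := xs[m] with hvdef
    set k := xs.findIdx (· == v) with hkdef
    have hkm : k ≤ m := by
      by_contra hc
      push Not at hc
      rw [List.lt_findIdx_iff] at hc
      obtain ⟨h, hall⟩ := hc
      have := hall m (le_refl m)
      simp at this
      exact this hvdef.symm
    have hk : k < xs.length := by omega
    have hkv : xs[k] = v := by
      have := List.findIdx_getElem (p := (· == v)) (xs := xs) (w := hk)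
      simpa [beq_iff_eq] using this
    have hmin : ∀ j, j < k → xs.getD j "" ≠ v := by
      intro j hj
      have hjl : j < xs.length := by omega
      rw [List.getD_eq_getElem?_getD]
      have hj' : j < xs.findIdx (· == v) := by omega
      rw [List.lt_findIdx_iff] at hj'
      obtain ⟨h, hall⟩ := hj'
      have := hall j (le_refl j)
      simp [hjl]
      simpa using this
    have hscan := scan_spec xs v k hk hkv hmin m 0 (by omega)
    simp only [Nat.cast_zero, zero_add] at hscan
    simp only []
    rw [him, hv, hscan]
    by_cases hkm' : k < m
    · rw [if_pos hkm', if_pos (by positivity)]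
    · rw [if_neg hkm', if_neg (by omega)]
      have hkem : List.findIdx (fun x => x == v) xs = m := by omega
      rw [hkem]
  rw [List.map_congr_left hmap]
  calc (PySem.List.pyRange 2 (xs.length : Int) 1).map
          (fun a => (fun v => ((List.findIdx (· == v) xs : Nat) : Int) - 1) (PySem.List.pyGetD xs a ""))
      = ((PySem.List.pyRange 2 (xs.length : Int) 1).map (fun j => PySem.List.pyGetD xs j "")).map
          (fun v => ((List.findIdx (· == v) xs : Nat) : Int) - 1) := by rw [List.map_map]; rfl
    _ = _ := by rw [PySem.List.map_pyGetD_pyRange' xs "" (a := 2) (by omega)]; rfl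

-- B: run loop_main on the sorted order
lemma B_res (xs : List String) :
    ((group_cols_order xs).foldl (gStep xs)
        (PySem.List.pyRepeat [(0 : Int)] (xs.length : Int), -1)).1.length = xs.length ∧
      ∀ i : Nat, i < xs.length →
        ((group_cols_order xs).foldl (gStep xs)
            (PySem.List.pyRepeat [(0 : Int)] (xs.length : Int), -1)).1[i]? = some (gF xs (i : Int)) := by
  refine loop_main xs (group_cols_order xs) _ (-1) ?_ (order_pairwise xs) ?_ ?_ ?_
  · rw [PySem.List.pyRepeat_singleton]
    simp
  · exact fun k h => (mem_order xs k).mp h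
  · intro i hi hmem
    exact absurd ((mem_order xs (i : Int)).mpr ⟨by positivity, by omega⟩) hmem
  · exact Or.inl ⟨rfl, fun i hi => (mem_order xs (i : Int)).mpr ⟨by positivity, by omega⟩⟩

theorem group_cols_eq (xs : List String) : group_cols xs = group_cols_alt xs := by
  rw [A_char]
  unfold group_cols_alt
  simp only []
  have hstep : (fun (s : List Int × Int) (k : Int) =>
      let r := if s.2 < 0 || !(PySem.List.pyGetD xs k "" == PySem.List.pyGetD xs s.2 "") then k else s.2
      (PySem.List.pySetD s.1 k r, r)) = gStep xs := rfl
  rw [hstep]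
  obtain ⟨hL, hG⟩ := B_res xs
  set res1 := ((group_cols_order xs).foldl (gStep xs)
      (PySem.List.pyRepeat [(0 : Int)] (xs.length : Int), -1)).1 with hres
  congr 1
  rw [PySem.List.slice_from _ (by omega), show ((2:Int)).toNat = 2 from rfl]
  refine List.ext_getElem ?_ ?_
  · simp [hL]
  · intro p h1 h2
    simp only [List.getElem_map, List.getElem_drop]
    have hp : 2 + p < xs.length := by
      simp [hL] at h2; omega
    have hgf : gF xs ((2 + p : Nat) : Int) = ((List.findIdx (· == xs[2 + p]'hp) xs : Nat) : Int) := by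
      rw [gF, gKey_eq xs (by positivity) (by exact_mod_cast hp)]
      simp only [Int.toNat_natCast]
    have hget : res1[2 + p]'(by omega) = gF xs ((2 + p : Nat) : Int) := by
      have h' := List.getElem?_eq_getElem (l := res1) (i := 2 + p) (by omega)
      rw [hG (2 + p) hp] at h'
      exact Option.some.inj h'.symm
    rw [hget, hgf]

-- ===== VERDICT (by name: the statement is the Claim_ definition above) =====
theorem group_cols_spec : Claim_equal_group_cols := by
  intro xs _
  unfold Spec_group_cols
  exact group_cols_eq xs
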